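-- pv_equiv track=rewrite | github.com/hmcezar/dicetools | dicewin.py | gen_new_labels
-- ===== SOURCE A (Python) =====
-- def repeated_label(labels):
--   lab_set = frozenset(labels)
--   rep_ind = {lab: [] for lab in lab_set}
--
--   for slab in lab_set:
--     for i, lab in enumerate(labels):
--       if lab == slab:
--         rep_ind[slab].append(i)
--
--   return rep_ind
--
-- def gen_new_labels(labels):
--   reap = repeated_label(labels).values()
--   for rinds in reap:
--     j = 1
--     for i in rinds:
--       if len(rinds) > 1:
--         labels[i] += str(j)
--         j += 1
--
--   return labels
-- ===== SOURCE B (Python) =====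
-- def gen_new_labels(labels):
--     # One counting pass, then one forward pass appending the occurrence rank
--     # to labels that occur more than once. Builds a fresh list (A mutates in
--     # place); return values agree.
--     total = {}
--     for lab in labels:
--         total[lab] = total.get(lab, 0) + 1
--     out = []
--     seen = {}
--     for lab in labels:
--         if total[lab] > 1:
--             seen[lab] = seen.get(lab, 0) + 1
--             out.append(lab + str(seen[lab]))
--         else:
--             out.append(lab)
--     return out
-- ===== Notes on version B (the rewrite author's own statement) =====
-- stated objective: faster
-- what changed: Replaces A's per-distinct-label rescans (a dict of index lists built by scanning the whole list once per distinct label, then a loop over the groups) with one counting pass plus one forward pass keeping a running per-label rank; B builds a fresh list instead of mutating in place.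
import Mathlib
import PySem

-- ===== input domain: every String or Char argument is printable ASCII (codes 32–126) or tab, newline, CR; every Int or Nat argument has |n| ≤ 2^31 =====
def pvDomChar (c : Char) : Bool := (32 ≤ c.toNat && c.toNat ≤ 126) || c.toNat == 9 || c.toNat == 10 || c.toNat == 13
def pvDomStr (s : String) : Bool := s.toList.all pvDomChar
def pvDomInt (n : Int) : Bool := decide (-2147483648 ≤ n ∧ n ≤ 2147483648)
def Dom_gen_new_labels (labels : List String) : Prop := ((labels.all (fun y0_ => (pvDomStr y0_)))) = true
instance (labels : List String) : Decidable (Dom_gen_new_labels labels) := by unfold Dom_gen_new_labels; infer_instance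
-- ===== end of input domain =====

-- B replaces A's per-distinct-label rescans with one counting pass plus one ranked forward
-- pass (objective: faster). A mutates the caller's list in place, B builds a fresh list;
-- the equivalence proved here is about the return value.

-- ===== PORT A =====
-- A iterates over frozenset(labels); the returned list does not depend on that hash order
-- (each group touches only its own indices), and the port uses first-occurrence order.
def repeated_label (labels : List String) : PySem.Dict String (List Int) :=
  let labSet : PySem.Set String := PySem.Set.ofList labels
  let repInd : PySem.Dict String (List Int) :=
    labSet.foldl (fun d lab => d.insert lab []) PySem.Dict.empty
  labSet.foldl
    (fun d slab =>
      (PySem.List.enumerate labels).foldl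
        (fun d2 p => if p.2 == slab then d2.insert slab (d2.getD slab [] ++ [p.1]) else d2)
        d)
    repInd

def gen_new_labels (labels : List String) : List String :=
  let reap := (repeated_label labels).values
  reap.foldl
    (fun labs rinds =>
      (rinds.foldl
        (fun (st : List String × Int) i =>
          if rinds.length > 1 then
            (PySem.List.pySetD st.1 i (PySem.List.pyGetD st.1 i "" ++ PySem.Int.toStr st.2),
             st.2 + 1)
          else st)
        (labs, 1)).1)
    labels

-- ===== PORT B =====
def gen_new_labels_alt (labels : List String) : List String :=
  let total : PySem.Dict String Int :=
    labels.foldl (fun d lab => d.insert lab (d.getD lab 0 + 1)) PySem.Dict.empty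
  (labels.foldl
    (fun (st : List String × PySem.Dict String Int) lab =>
      if total.getD lab 0 > 1 then
        let k := st.2.getD lab 0 + 1
        (st.1 ++ [lab ++ PySem.Int.toStr k], st.2.insert lab k)
      else (st.1 ++ [lab], st.2))
    ([], PySem.Dict.empty)).1

-- ===== PRECONDITION & SPEC =====
def Spec_gen_new_labels (labels : List String) (out : List String) : Prop := out = gen_new_labels_alt labels
instance (labels : List String) (out : List String) : Decidable (Spec_gen_new_labels labels out) := by unfold Spec_gen_new_labels; infer_instance

-- ===== CLAIM (what is proved, stated in full; the proofs are below) =====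
def Claim_equal_gen_new_labels : Prop := ∀ (labels : List String), Dom_gen_new_labels labels → Spec_gen_new_labels labels (gen_new_labels labels)

-- ===== LEMMAS AND PROOFS =====

-- ---- shared reference: position-ranked decoration ----

/-- Indices (0-based) of occurrences of `s`, in increasing order. -/
def pvIdxN (s : String) : List String → List Nat
  | [] => []
  | x :: xs => if x == s then 0 :: (pvIdxN s xs).map (· + 1) else (pvIdxN s xs).map (· + 1)

/-- Rank of position `m` in a (rank, position) list: first match. -/
def pvRk (q : List (Int × Nat)) (m : Nat) : Option Int :=
  (q.find? (fun p => p.2 == m)).map (·.1)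

/-- Target value at position `m` once the labels in `D` have been processed. -/
def pvVal (orig D : List String) (m : Nat) : String :=
  let s := orig.getD m ""
  if s ∈ D ∧ 1 < orig.count s then
    s ++ PySem.Int.toStr (((orig.take (m + 1)).count s : Int))
  else s

/-- Reference decoration: walk `rest` with already-seen prefix `pre`. -/
def pvRef (orig : List String) (pre : List String) : List String → List String
  | [] => []
  | s :: rest =>
      (if 1 < orig.count s then s ++ PySem.Int.toStr ((pre.count s : Int) + 1) else s)
        :: pvRef orig (pre ++ [s]) rest

-- ---- pvIdxN facts ----

lemma mem_pvIdxN (s : String) : ∀ (xs : List String) (m : Nat),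
    m ∈ pvIdxN s xs ↔ m < xs.length ∧ xs.getD m "" = s := by
  intro xs
  induction xs with
  | nil => intro m; simp [pvIdxN]
  | cons x xs ih =>
    intro m
    cases m with
    | zero =>
      by_cases h : x = s <;> simp [pvIdxN, h]
    | succ m =>
      by_cases h : x = s <;>
        simp [pvIdxN, h, ih m, Nat.succ_lt_succ_iff]

lemma nodup_pvIdxN (s : String) (xs : List String) : (pvIdxN s xs).Nodup := by
  induction xs with
  | nil => simp [pvIdxN]
  | cons x xs ih =>
    have hinj : Function.Injective (· + 1 : Nat → Nat) := by intro a b hab; simp at hab; omega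
    by_cases h : x = s <;>
      simp [pvIdxN, h, List.nodup_map_iff hinj, ih]

lemma length_pvIdxN (s : String) (xs : List String) : (pvIdxN s xs).length = xs.count s := by
  induction xs with
  | nil => simp [pvIdxN]
  | cons x xs ih =>
    by_cases h : x = s <;> simp [pvIdxN, h, List.count_cons, ih]

lemma filter_enumerate_eq_pvIdxN (s : String) : ∀ (xs : List String) (k : Nat),
    ((PySem.List.enumerate xs (k : Int)).filter (fun p => p.2 == s)).map (·.1)
      = ((pvIdxN s xs).map (· + k)).map (fun m : Nat => (m : Int)) := by
  intro xs
  induction xs with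
  | nil => intro k; simp [pvIdxN, PySem.List.enumerate]
  | cons x xs ih =>
    intro k
    rw [PySem.List.enumerate_cons]
    have hk : (k : Int) + 1 = ((k + 1 : Nat) : Int) := by push_cast; ring
    rw [hk]
    by_cases h : x = s
    · simp only [List.filter_cons, h, beq_self_eq_true, if_true, List.map_cons, ih (k + 1),
        pvIdxN, List.map_map]
      congr 1
      · norm_num
      · apply List.map_congr_left; intro a _; simp [Function.comp]; omega
    · simp only [List.filter_cons]
      rw [if_neg (by simp [h])]
      simp only [ih (k + 1), pvIdxN, List.map_map]
      rw [if_neg (by simp [h])]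
      simp only [List.map_map]
      apply List.map_congr_left; intro a _; simp [Function.comp]; omega

-- ---- rank lookup facts ----

lemma pvRk_eq_none_of_not_mem (q : List (Int × Nat)) (m : Nat)
    (h : m ∉ q.map (·.2)) : pvRk q m = none := by
  unfold pvRk
  rw [List.find?_eq_none.mpr]
  · rfl
  · intro p hp hb
    exact h (List.mem_map.mpr ⟨p, hp, by simpa using hb⟩)

lemma pvRk_shift_zero (l : List Nat) (j : Int) :
    pvRk (PySem.List.enumerate (l.map (· + 1)) j) 0 = none := by
  apply pvRk_eq_none_of_not_mem
  rw [PySem.List.map_snd_enumerate]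
  simp

lemma pvRk_shift_succ (l : List Nat) (j : Int) (m : Nat) :
    pvRk (PySem.List.enumerate (l.map (· + 1)) j) (m + 1)
      = pvRk (PySem.List.enumerate l j) m := by
  induction l generalizing j with
  | nil => rfl
  | cons a l ih =>
    simp only [List.map_cons, PySem.List.enumerate_cons, pvRk, List.find?_cons]
    rw [show (a + 1 == m + 1) = (a == m) by simp]
    cases hab : (a == m)
    · exact ih (j + 1)
    · rfl

lemma pvRk_idx (s : String) : ∀ (xs : List String) (j : Int) (m : Nat),
    pvRk (PySem.List.enumerate (pvIdxN s xs) j) m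
      = if m < xs.length ∧ xs.getD m "" = s then some (j + ((xs.take m).count s : Int))
        else none := by
  intro xs
  induction xs with
  | nil => intro j m; simp [pvIdxN, pvRk, PySem.List.enumerate]
  | cons x xs ih =>
    intro j m
    by_cases h : x = s
    · subst h
      simp only [pvIdxN, beq_self_eq_true, if_true, PySem.List.enumerate_cons]
      cases m with
      | zero =>
        rw [if_pos ⟨by simp, by simp⟩]
        simp [pvRk, List.find?_cons]
      | succ m =>
        have h0 : pvRk ((j, 0) :: PySem.List.enumerate ((pvIdxN x xs).map (· + 1)) (j + 1)) (m + 1)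
            = pvRk (PySem.List.enumerate ((pvIdxN x xs).map (· + 1)) (j + 1)) (m + 1) := by
          simp [pvRk, List.find?_cons]
        rw [h0, pvRk_shift_succ, ih (j + 1) m]
        by_cases hm : m < xs.length ∧ xs.getD m "" = x
        · rw [if_pos hm, if_pos ⟨by simpa [Nat.succ_lt_succ_iff] using hm.1, by simpa using hm.2⟩]
          rw [List.take_succ_cons]
          congr 1
          simp [List.count_cons]
          push_cast
          ring
        · have hne : ¬(m + 1 < (x :: xs).length ∧ (x :: xs).getD (m + 1) "" = x) := by
            simpa [Nat.succ_lt_succ_iff] using hm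
          rw [if_neg hm, if_neg hne]
    · simp only [pvIdxN]
      rw [if_neg (show ¬((x == s) = true) by simp [h])]
      cases m with
      | zero =>
        rw [pvRk_shift_zero,
          if_neg (show ¬(0 < (x :: xs).length ∧ (x :: xs).getD 0 "" = s) by simp [h])]
      | succ m =>
        rw [pvRk_shift_succ, ih j m]
        by_cases hm : m < xs.length ∧ xs.getD m "" = s
        · rw [if_pos hm, if_pos ⟨by simpa [Nat.succ_lt_succ_iff] using hm.1, by simpa using hm.2⟩]
          rw [List.take_succ_cons]
          congr 2
          simp [List.count_cons, h]
        · have hne : ¬(m + 1 < (x :: xs).length ∧ (x :: xs).getD (m + 1) "" = s) := by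
            simpa [Nat.succ_lt_succ_iff] using hm
          rw [if_neg hm, if_neg hne]

-- ---- the write loop of one group ----

def pvWStep (C : List String) (p : Int × Nat) : List String :=
  C.set p.2 (C.getD p.2 "" ++ PySem.Int.toStr p.1)

lemma pvGrp (s : String) : ∀ (q : List (Int × Nat)) (C : List String),
    (q.map (·.2)).Nodup →
    (∀ p ∈ q, p.2 < C.length ∧ C.getD p.2 "" = s) →
    (q.foldl pvWStep C).length = C.length ∧
      ∀ m : Nat, (q.foldl pvWStep C).getD m "" =
        match pvRk q m with
        | some r => s ++ PySem.Int.toStr r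
        | none => C.getD m "" := by
  intro q
  induction q with
  | nil => intro C _ _; exact ⟨rfl, fun m => rfl⟩
  | cons p q ih =>
    intro C hnd hmem
    obtain ⟨hlt, hval⟩ := hmem p (List.mem_cons_self)
    simp only [List.map_cons, List.nodup_cons] at hnd
    have hC' : pvWStep C p = C.set p.2 (s ++ PySem.Int.toStr p.1) := by
      rw [pvWStep, hval]
    have hlen' : (pvWStep C p).length = C.length := by rw [hC']; simp
    have hmem' : ∀ p' ∈ q, p'.2 < (pvWStep C p).length ∧ (pvWStep C p).getD p'.2 "" = s := by
      intro p' hp'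
      obtain ⟨h1, h2⟩ := hmem p' (List.mem_cons_of_mem _ hp')
      refine ⟨by omega, ?_⟩
      have hne : p'.2 ≠ p.2 := by
        intro hcontra
        exact hnd.1 (List.mem_map.mpr ⟨p', hp', hcontra⟩) |>.elim
      rw [hC', List.getD, List.getElem?_set_ne (by omega), ← List.getD]
      exact h2
    obtain ⟨ihlen, ihval⟩ := ih (pvWStep C p) hnd.2 hmem'
    refine ⟨by simpa [hlen'] using ihlen, ?_⟩
    intro m
    rw [List.foldl_cons, ihval m]
    by_cases hm : p.2 = m
    · subst hm
      have : pvRk q p.2 = none := by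
        apply pvRk_eq_none_of_not_mem
        intro hc
        exact hnd.1 (by simpa using hc)
      rw [this]
      have : pvRk (p :: q) p.2 = some p.1 := by simp [pvRk, List.find?_cons]
      rw [this, hC', List.getD, List.getElem?_set_self (by omega)]
      rfl
    · have : pvRk (p :: q) m = pvRk q m := by
        simp only [pvRk, List.find?_cons]
        rw [show (p.2 == m) = false by simp [hm]]
      rw [this]
      cases hrk : pvRk q m with
      | some r => rfl
      | none =>
        rw [hC', List.getD, List.getElem?_set_ne (by omega), ← List.getD]

-- ---- A: the dict produced by repeated_label ----

def pvIdxI (labels : List String) (s : String) : List Int :=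
  ((PySem.List.enumerate labels).filter (fun p => p.2 == s)).map (·.1)

lemma pv_insert_getD_self (d : PySem.Dict String (List Int)) (k : String)
    (hnd : d.keys.Nodup) (hc : d.contains k = true) :
    d.insert k (d.getD k []) = d := by
  apply PySem.Dict.ext
  rw [PySem.Dict.items_insert_of_contains _ _ hc]
  have h : ∀ p ∈ d.items, (if (p.1 == k) = true then (k, d.getD k ([] : List Int)) else p) = p := by
    intro p hp
    obtain ⟨a, b⟩ := p
    by_cases hpk : a = k
    · subst hpk
      rw [if_pos (by simp)]
      rw [PySem.Dict.getD_of_mem_items _ hp hnd]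
    · rw [if_neg (by simp [hpk])]
  rw [List.map_congr_left h]
  simp

lemma pv_inner_eq (slab : String) :
    ∀ (xs : List (Int × String)) (d : PySem.Dict String (List Int)),
    d.keys.Nodup → d.contains slab = true →
    xs.foldl (fun d2 p => if p.2 == slab then d2.insert slab (d2.getD slab [] ++ [p.1]) else d2) d
      = d.insert slab (d.getD slab [] ++ ((xs.filter (fun p => p.2 == slab)).map (·.1))) := by
  intro xs
  induction xs with
  | nil =>
    intro d hnd hc
    simp only [List.foldl_nil, List.filter_nil, List.map_nil, List.append_nil]
    exact (pv_insert_getD_self d slab hnd hc).symm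
  | cons p xs ih =>
    intro d hnd hc
    by_cases hp : p.2 = slab
    · simp only [List.foldl_cons, List.filter_cons, hp, beq_self_eq_true, if_true, List.map_cons]
      rw [ih _ (PySem.Dict.nodup_keys_insert _ _ _ hnd)
          (by rw [PySem.Dict.contains_insert]; simp)]
      rw [PySem.Dict.getD_insert_self, PySem.Dict.insert_insert_self]
      simp [List.append_assoc]
    · simp only [List.foldl_cons, List.filter_cons]
      rw [if_neg (show ¬((p.2 == slab) = true) by simp [hp]),
          if_neg (show ¬((p.2 == slab) = true) by simp [hp])]
      exact ih d hnd hc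

lemma pv_outer_items (labels : List String) :
    ∀ (S : List String) (d : PySem.Dict String (List Int)),
    S.Nodup → d.keys.Nodup →
    (∀ s ∈ S, d.contains s = true ∧ d.getD s [] = []) →
    (S.foldl
        (fun d slab =>
          (PySem.List.enumerate labels).foldl
            (fun d2 p => if p.2 == slab then d2.insert slab (d2.getD slab [] ++ [p.1]) else d2)
            d)
        d).items
      = d.items.map (fun q => if q.1 ∈ S then (q.1, pvIdxI labels q.1) else q) := by
  intro S
  induction S with
  | nil =>
    intro d _ _ _
    simp
  | cons s S ih =>
    intro d hS hnd hyp
    obtain ⟨hcs, hgs⟩ := hyp s List.mem_cons_self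
    simp only [List.nodup_cons] at hS
    simp only [List.foldl_cons]
    rw [pv_inner_eq s _ d hnd hcs, hgs, List.nil_append]
    rw [ih _ hS.2 (PySem.Dict.nodup_keys_insert _ _ _ hnd) ?side]
    case side =>
      intro s' hs'
      have hne : s' ≠ s := fun hcontra => hS.1 (hcontra ▸ hs')
      refine ⟨?_, ?_⟩
      · rw [PySem.Dict.contains_insert]
        simp [(hyp s' (List.mem_cons_of_mem _ hs')).1]
      · rw [PySem.Dict.getD_insert_of_ne _ _ _ hne]
        exact (hyp s' (List.mem_cons_of_mem _ hs')).2
    rw [PySem.Dict.items_insert_of_contains _ _ hcs, List.map_map]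
    apply List.map_congr_left
    intro q hq
    obtain ⟨a, b⟩ := q
    by_cases hak : a = s
    · subst hak
      simp only [Function.comp_apply, beq_self_eq_true, if_true]
      rw [if_neg (by simpa using hS.1), if_pos (by simp)]
      rfl
    · simp only [Function.comp_apply]
      rw [show ((a, b).1 == s) = false by simp [hak]]
      simp only [Bool.false_eq_true, if_false]
      by_cases haS : a ∈ S
      · rw [if_pos haS, if_pos (by simp [haS])]
      · rw [if_neg haS, if_neg (by simp [hak, haS])]

lemma pv_repeated_items (labels : List String) :
    (repeated_label labels).items
      = (PySem.Set.ofList labels).map (fun s => (s, pvIdxI labels s)) := by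
  have hd0 : ((PySem.Set.ofList labels).foldl
      (fun (d : PySem.Dict String (List Int)) lab => d.insert lab []) PySem.Dict.empty).items
      = (PySem.Set.ofList labels).map (fun s => (s, ([] : List Int))) := by
    have := PySem.Dict.items_foldl_insert_fresh (PySem.Set.ofList labels)
      (fun a => a) (fun _ => ([] : List Int)) PySem.Dict.empty
      (by intro a _; simp [PySem.Dict.contains_empty])
      (by simpa using PySem.Set.nodup_ofList labels)
    simpa using this
  have hkeys : ((PySem.Set.ofList labels).foldl
      (fun (d : PySem.Dict String (List Int)) lab => d.insert lab []) PySem.Dict.empty).keys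
      = PySem.Set.ofList labels := by
    rw [PySem.Dict.keys_foldl_insert]
    rw [PySem.Dict.keys_empty]
    rw [PySem.Set.update_nil_left]
    exact PySem.Set.ofList_ofList labels
  simp only [repeated_label]
  rw [pv_outer_items labels (PySem.Set.ofList labels) _
      (PySem.Set.nodup_ofList labels)
      (by rw [hkeys]; exact PySem.Set.nodup_ofList labels)
      ?side]
  case side =>
    intro s hs
    constructor
    · rw [PySem.Dict.contains_iff_mem_keys, hkeys]; exact hs
    · apply PySem.Dict.getD_of_mem_items
      · rw [hd0]; exact List.mem_map.mpr ⟨s, hs, rfl⟩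
      · rw [hkeys]; exact PySem.Set.nodup_ofList labels
  rw [hd0, List.map_map]
  apply List.map_congr_left
  intro s hs
  simp only [Function.comp_apply]
  rw [if_pos hs]

-- ---- A: the writing phase ----

lemma pv_pair_fold : ∀ (rinds : List Int) (labs : List String) (j : Int),
    (rinds.foldl
        (fun (st : List String × Int) i =>
          (PySem.List.pySetD st.1 i (PySem.List.pyGetD st.1 i "" ++ PySem.Int.toStr st.2),
           st.2 + 1))
        (labs, j)).1
      = (PySem.List.enumerate rinds j).foldl
          (fun C p => PySem.List.pySetD C p.2 (PySem.List.pyGetD C p.2 "" ++ PySem.Int.toStr p.1))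
          labs := by
  intro rinds
  induction rinds with
  | nil => intro labs j; rfl
  | cons i rinds ih =>
    intro labs j
    rw [List.foldl_cons, PySem.List.enumerate_cons, List.foldl_cons]
    exact ih _ (j + 1)

lemma pv_cast_fold : ∀ (l : List Nat) (j : Int) (C : List String),
    (PySem.List.enumerate (l.map (fun k : Nat => (k : Int))) j).foldl
        (fun C p => PySem.List.pySetD C p.2 (PySem.List.pyGetD C p.2 "" ++ PySem.Int.toStr p.1))
        C
      = (PySem.List.enumerate l j).foldl pvWStep C := by
  intro l
  induction l with
  | nil => intro j C; rfl
  | cons k l ih =>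
    intro j C
    rw [List.map_cons, PySem.List.enumerate_cons, PySem.List.enumerate_cons,
        List.foldl_cons, List.foldl_cons]
    rw [PySem.List.pyGetD_natCast, PySem.List.pySetD_natCast]
    exact ih (j + 1) _

/-- One group-processing step of `gen_new_labels`, as the port writes it. -/
def pvGStep (labs : List String) (rinds : List Int) : List String :=
  (rinds.foldl
    (fun (st : List String × Int) i =>
      if rinds.length > 1 then
        (PySem.List.pySetD st.1 i (PySem.List.pyGetD st.1 i "" ++ PySem.Int.toStr st.2), st.2 + 1)
      else st)
    (labs, 1)).1

lemma pvGStep_inv (orig : List String) (D : List String) (C : List String) (s : String)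
    (hs : s ∉ D) (hlen : C.length = orig.length)
    (hinv : ∀ m, m < orig.length → C.getD m "" = pvVal orig D m) :
    (pvGStep C ((pvIdxN s orig).map (fun k : Nat => (k : Int)))).length = orig.length ∧
      ∀ m, m < orig.length →
        (pvGStep C ((pvIdxN s orig).map (fun k : Nat => (k : Int)))).getD m ""
          = pvVal orig (D ++ [s]) m := by
  have hrlen : ((pvIdxN s orig).map (fun k : Nat => (k : Int))).length = orig.count s := by
    simp [length_pvIdxN]
  by_cases hcnt : 1 < orig.count s
  · -- the group really gets decorated
    have hgt : ((pvIdxN s orig).map (fun k : Nat => (k : Int))).length > 1 := by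
      rw [hrlen]; omega
    have hstep : pvGStep C ((pvIdxN s orig).map (fun k : Nat => (k : Int)))
        = (PySem.List.enumerate (pvIdxN s orig) 1).foldl pvWStep C := by
      unfold pvGStep
      rw [PySem.List.foldl_congr_mem _ _
          (fun (st : List String × Int) i =>
            (PySem.List.pySetD st.1 i (PySem.List.pyGetD st.1 i "" ++ PySem.Int.toStr st.2),
             st.2 + 1)) _
          (by intro st i _; rw [if_pos hgt])]
      rw [pv_pair_fold, pv_cast_fold]
    have hnd : ((PySem.List.enumerate (pvIdxN s orig) 1).map (·.2)).Nodup := by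
      rw [PySem.List.map_snd_enumerate]
      exact nodup_pvIdxN s orig
    have hmem : ∀ p ∈ PySem.List.enumerate (pvIdxN s orig) 1,
        p.2 < C.length ∧ C.getD p.2 "" = s := by
      intro p hp
      have hp2 : p.2 ∈ pvIdxN s orig := by
        have : p.2 ∈ (PySem.List.enumerate (pvIdxN s orig) 1).map (·.2) :=
          List.mem_map.mpr ⟨p, hp, rfl⟩
        rwa [PySem.List.map_snd_enumerate] at this
      obtain ⟨h1, h2⟩ := (mem_pvIdxN s orig p.2).mp hp2
      refine ⟨by omega, ?_⟩
      rw [hinv p.2 h1]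
      simp only [pvVal, h2]
      rw [if_neg (fun hc => hs hc.1)]
    obtain ⟨hlen2, hval2⟩ := pvGrp s (PySem.List.enumerate (pvIdxN s orig) 1) C hnd hmem
    rw [hstep]
    refine ⟨by omega, ?_⟩
    intro m hm
    rw [hval2 m, pvRk_idx s orig 1 m]
    by_cases hsm : orig.getD m "" = s
    · rw [if_pos ⟨hm, hsm⟩]
      simp only [pvVal, hsm]
      rw [if_pos ⟨by simp, hcnt⟩]
      have htake : (orig.take (m + 1)).count s = (orig.take m).count s + 1 := by
        rw [List.take_add_one]
        have : orig[m]? = some s := by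
          rw [List.getElem?_eq_getElem hm, ← List.getD_eq_getElem orig "" hm, hsm]
        rw [this]
        simp [List.count_append]
      rw [htake]
      show s ++ PySem.Int.toStr (1 + ((orig.take m).count s : Int)) = _
      congr 1
      push_cast
      ring
    · rw [if_neg (fun hc => hsm hc.2)]
      rw [hinv m hm]
      simp only [pvVal]
      have hiff : (orig.getD m "" ∈ D ∧ 1 < orig.count (orig.getD m ""))
          ↔ (orig.getD m "" ∈ D ++ [s] ∧ 1 < orig.count (orig.getD m "")) := by
        constructor
        · intro hc; exact ⟨List.mem_append_left _ hc.1, hc.2⟩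
        · intro hc
          refine ⟨?_, hc.2⟩
          rcases List.mem_append.mp hc.1 with h' | h'
          · exact h'
          · exact absurd (List.mem_singleton.mp h') hsm
      rw [if_congr hiff rfl rfl]
  · -- group of size ≤ 1: nothing written
    have hskip : pvGStep C ((pvIdxN s orig).map (fun k : Nat => (k : Int))) = C := by
      unfold pvGStep
      rw [PySem.List.foldl_congr_mem _ _ (fun (st : List String × Int) _ => st) _
          (by intro st i _; rw [if_neg (by rw [hrlen]; omega)])]
      rw [PySem.List.foldl_ignore]
    rw [hskip]
    refine ⟨hlen, ?_⟩
    intro m hm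
    rw [hinv m hm]
    simp only [pvVal]
    have hiff : (orig.getD m "" ∈ D ∧ 1 < orig.count (orig.getD m ""))
        ↔ (orig.getD m "" ∈ D ++ [s] ∧ 1 < orig.count (orig.getD m "")) := by
      by_cases hsm : orig.getD m "" = s
      · rw [hsm]
        constructor
        · intro hc; exact absurd hc.2 hcnt
        · intro hc; exact absurd hc.2 hcnt
      · constructor
        · intro hc; exact ⟨List.mem_append_left _ hc.1, hc.2⟩
        · intro hc
          refine ⟨?_, hc.2⟩
          rcases List.mem_append.mp hc.1 with h' | h'
          · exact h'
          · exact absurd (List.mem_singleton.mp h') hsm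
    rw [if_congr hiff rfl rfl]

lemma pv_outer_inv (orig : List String) :
    ∀ (S : List String) (D : List String) (C : List String),
    (D ++ S).Nodup → C.length = orig.length →
    (∀ m, m < orig.length → C.getD m "" = pvVal orig D m) →
    (S.foldl (fun C s => pvGStep C ((pvIdxN s orig).map (fun k : Nat => (k : Int)))) C).length
        = orig.length ∧
      ∀ m, m < orig.length →
        (S.foldl (fun C s => pvGStep C ((pvIdxN s orig).map (fun k : Nat => (k : Int)))) C).getD m ""
          = pvVal orig (D ++ S) m := by
  intro S
  induction S with
  | nil =>
    intro D C hnd hlen hinv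
    simpa using ⟨hlen, hinv⟩
  | cons s S ih =>
    intro D C hnd hlen hinv
    have hs : s ∉ D := by
      rw [List.nodup_append] at hnd
      exact fun hc => hnd.2.2 s hc s List.mem_cons_self rfl
    obtain ⟨hlen', hinv'⟩ := pvGStep_inv orig D C s hs hlen hinv
    have hnd' : (D ++ [s] ++ S).Nodup := by
      rwa [List.append_cons] at hnd
    rw [List.foldl_cons]
    obtain ⟨h1, h2⟩ := ih (D ++ [s]) _ hnd' hlen' hinv'
    refine ⟨h1, ?_⟩
    intro m hm
    rw [h2 m hm, ← List.append_cons]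

lemma pv_A_char (labels : List String) :
    (gen_new_labels labels).length = labels.length ∧
      ∀ m, m < labels.length →
        (gen_new_labels labels).getD m "" = pvVal labels (PySem.Set.ofList labels) m := by
  have hA : gen_new_labels labels = ((repeated_label labels).values).foldl pvGStep labels := rfl
  have hv : (repeated_label labels).values
      = (PySem.Set.ofList labels).map (fun s => pvIdxI labels s) := by
    show (repeated_label labels).items.map (·.2) = _
    rw [pv_repeated_items, List.map_map]
    rfl
  have hidx : ∀ s, pvIdxI labels s = (pvIdxN s labels).map (fun k : Nat => (k : Int)) := by
    intro s
    have := filter_enumerate_eq_pvIdxN s labels 0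
    simp only [Nat.cast_zero] at this
    unfold pvIdxI
    rw [this]
    congr 1
    simp
  rw [hA, hv]
  rw [List.foldl_map]
  have hbody : (fun (C : List String) s => pvGStep C (pvIdxI labels s))
      = fun C s => pvGStep C ((pvIdxN s labels).map (fun k : Nat => (k : Int))) := by
    funext C s
    rw [hidx s]
  rw [hbody]
  have := pv_outer_inv labels (PySem.Set.ofList labels) [] labels
    (by simpa using PySem.Set.nodup_ofList labels) rfl
    (by intro m hm; simp [pvVal])
  simpa using this

-- ---- B: characterization ----

lemma pvRef_length (orig : List String) : ∀ (rest pre : List String),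
    (pvRef orig pre rest).length = rest.length := by
  intro rest
  induction rest with
  | nil => intro pre; rfl
  | cons s rest ih => intro pre; simp [pvRef, ih]

lemma pvRef_getD (orig : List String) : ∀ (rest pre : List String) (t : Nat), t < rest.length →
    (pvRef orig pre rest).getD t "" =
      (let s := rest.getD t ""
       if 1 < orig.count s then s ++ PySem.Int.toStr (((pre ++ rest.take (t + 1)).count s : Int))
       else s) := by
  intro rest
  induction rest with
  | nil => intro pre t ht; simp at ht
  | cons s rest ih =>
    intro pre t ht
    cases t with
    | zero =>
      simp only [pvRef, List.getD_cons_zero, List.take_succ_cons, List.take_zero]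
      by_cases h : 1 < orig.count s
      · rw [if_pos h, if_pos h]
        congr 2
        simp
      · rw [if_neg h, if_neg h]
    | succ t =>
      have ht' : t < rest.length := by simpa using ht
      simp only [pvRef, List.getD_cons_succ, List.take_succ_cons]
      rw [ih (pre ++ [s]) t ht']
      simp [List.append_assoc]

lemma pv_B_go (orig : List String) :
    ∀ (rest : List String) (acc : List String) (seen : PySem.Dict String Int)
      (pre : List String),
    (∀ t : String, 1 < orig.count t → seen.getD t 0 = (pre.count t : Int)) →
    (rest.foldl
        (fun (st : List String × PySem.Dict String Int) lab =>
          if (PySem.Dict.counter orig).getD lab 0 > 1 then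
            (st.1 ++ [lab ++ PySem.Int.toStr (st.2.getD lab 0 + 1)],
             st.2.insert lab (st.2.getD lab 0 + 1))
          else (st.1 ++ [lab], st.2))
        (acc, seen)).1
      = acc ++ pvRef orig pre rest := by
  intro rest
  induction rest with
  | nil => intro acc seen pre _; simp [pvRef]
  | cons lab rest ih =>
    intro acc seen pre hseen
    rw [List.foldl_cons]
    have hcnt : (PySem.Dict.counter orig).getD lab 0 = (orig.count lab : Int) :=
      PySem.Dict.getD_counter orig lab
    by_cases h : 1 < orig.count lab
    · rw [if_pos (by rw [hcnt]; exact_mod_cast h)]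
      have hsl : seen.getD lab 0 = (pre.count lab : Int) := hseen lab h
      rw [ih _ _ (pre ++ [lab]) ?inv]
      case inv =>
        intro t ht
        by_cases htl : t = lab
        · subst htl
          rw [PySem.Dict.getD_insert_self, hsl]
          simp [List.count_append]
        · rw [PySem.Dict.getD_insert_of_ne _ _ _ htl, hseen t ht]
          congr 1
          simp [List.count_append, List.count_cons, Ne.symm htl]
      simp only [pvRef]
      rw [if_pos h, hsl]
      simp [List.append_assoc]
    · rw [if_neg (by rw [hcnt]; exact_mod_cast h)]
      rw [ih _ _ (pre ++ [lab]) ?inv]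
      case inv =>
        intro t ht
        have htl : t ≠ lab := fun hc => h (hc ▸ ht)
        rw [hseen t ht]
        congr 1
        simp [List.count_append, List.count_cons, Ne.symm htl]
      simp only [pvRef]
      rw [if_neg h]
      simp [List.append_assoc]

lemma pv_B_eq (labels : List String) :
    gen_new_labels_alt labels = pvRef labels [] labels := by
  show (labels.foldl _ (([] : List String), (PySem.Dict.empty : PySem.Dict String Int))).1 = _
  have htot : labels.foldl
      (fun (d : PySem.Dict String Int) lab => d.insert lab (d.getD lab 0 + 1))
      PySem.Dict.empty = PySem.Dict.counter labels :=
    PySem.Dict.foldl_insert_getD_add_one_eq_counter labels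
  calc (labels.foldl
        (fun (st : List String × PySem.Dict String Int) lab =>
          if (labels.foldl
              (fun (d : PySem.Dict String Int) lab => d.insert lab (d.getD lab 0 + 1))
              PySem.Dict.empty).getD lab 0 > 1 then
            (st.1 ++ [lab ++ PySem.Int.toStr (st.2.getD lab 0 + 1)],
             st.2.insert lab (st.2.getD lab 0 + 1))
          else (st.1 ++ [lab], st.2))
        ([], PySem.Dict.empty)).1
      = (labels.foldl
          (fun (st : List String × PySem.Dict String Int) lab =>
            if (PySem.Dict.counter labels).getD lab 0 > 1 then
              (st.1 ++ [lab ++ PySem.Int.toStr (st.2.getD lab 0 + 1)],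
               st.2.insert lab (st.2.getD lab 0 + 1))
            else (st.1 ++ [lab], st.2))
          ([], PySem.Dict.empty)).1 := by rw [htot]
    _ = [] ++ pvRef labels [] labels := by
          apply pv_B_go labels labels [] PySem.Dict.empty []
          intro t _
          simp [PySem.Dict.getD_empty]
    _ = pvRef labels [] labels := by simp

-- ===== VERDICT (by name: the statement is the Claim_ definition above) =====
theorem gen_new_labels_spec : Claim_equal_gen_new_labels := by
  intro labels _
  show gen_new_labels labels = gen_new_labels_alt labels
  obtain ⟨hAlen, hAval⟩ := pv_A_char labels
  rw [pv_B_eq labels]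
  apply List.ext_getElem
  · rw [hAlen, pvRef_length labels labels []]
  · intro n h1 h2
    have hn : n < labels.length := by rw [hAlen] at h1; exact h1
    rw [← List.getD_eq_getElem _ "" h1, ← List.getD_eq_getElem _ "" h2]
    rw [hAval n hn, pvRef_getD labels labels [] n hn]
    simp only [pvVal, List.nil_append]
    have hmem : labels.getD n "" ∈ PySem.Set.ofList labels := by
      rw [PySem.Set.mem_ofList, List.getD_eq_getElem labels "" hn]
      exact List.getElem_mem _
    by_cases hc : 1 < labels.count (labels.getD n "")
    · rw [if_pos ⟨hmem, hc⟩, if_pos hc]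
    · rw [if_neg (fun hp => hc hp.2), if_neg hc]
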